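-- pv_equiv track=rewrite | github.com/yakobsolo/Leetcode | 0985-sum-of-even-numbers-after-queries/0985-sum-of-even-numbers-after-queries.py | sumEvenAfterQueries
-- ===== SOURCE A (Python) =====
-- from typing import List
--
-- def sumEvenAfterQueries(nums: List[int], queries: List[List[int]]) -> List[int]:
--     sums = 0
--     for n in nums:
--         if not n%2: sums += n
--     res = [0]*len(queries)
--     i = 0
--     for q in queries:
--         v, idx = q
--         if not nums[idx]%2:
--             sums -= nums[idx]
--         nums[idx] += v
--         if not nums[idx]%2:
--             sums+=nums[idx]
--             res[i] = sums
--         else: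
--             res[i] = sums
--         i+=1
--     return res
-- ===== SOURCE B (Python) =====
-- def sumEvenAfterQueries(nums, queries):
--     res = []
--     for v, idx in queries:
--         nums[idx] += v
--         res.append(sum(x for x in nums if x % 2 == 0))
--     return res
-- ===== Notes on version B (the rewrite author's own statement) =====
-- stated objective: alternative
-- what changed: B drops A's incrementally maintained running even-sum and its preallocated result array: after each in-place update it recomputes the even-sum from scratch by a full scan of nums and appends it.
import Mathlib
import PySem

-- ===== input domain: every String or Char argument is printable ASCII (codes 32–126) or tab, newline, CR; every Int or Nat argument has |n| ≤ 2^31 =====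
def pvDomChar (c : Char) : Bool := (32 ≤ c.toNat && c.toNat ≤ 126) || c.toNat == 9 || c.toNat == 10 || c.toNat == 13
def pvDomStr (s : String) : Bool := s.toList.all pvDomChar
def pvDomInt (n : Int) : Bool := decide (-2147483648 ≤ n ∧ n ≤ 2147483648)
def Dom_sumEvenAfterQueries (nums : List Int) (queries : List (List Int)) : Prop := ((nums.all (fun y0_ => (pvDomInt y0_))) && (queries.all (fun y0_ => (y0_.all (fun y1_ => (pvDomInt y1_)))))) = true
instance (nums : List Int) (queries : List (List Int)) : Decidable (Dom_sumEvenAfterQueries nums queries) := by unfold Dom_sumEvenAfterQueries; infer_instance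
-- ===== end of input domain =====

-- B recomputes the even-sum by a full rescan per query instead of A's incremental bookkeeping;
-- both mutate nums in place identically in Python (the equivalence proved is about the return value).

-- ===== PORT A =====
def sumEvenAfterQueries (nums : List Int) (queries : List (List Int)) : List Int :=
  -- sums = 0; for n in nums: if not n%2: sums += n
  let sums := nums.foldl (fun s n => if PySem.Int.mod n 2 = 0 then s + n else s) 0
  -- res starts as [0]*len(queries) with res[i] written in order; transliterated as an append accumulator
  (queries.foldl (fun (st : Int × List Int × List Int) q =>
      let v := PySem.List.pyGetD q 0 0
      let idx := PySem.List.pyGetD q 1 0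
      let cur := PySem.List.pyGetD st.2.1 idx 0
      let s1 := if PySem.Int.mod cur 2 = 0 then st.1 - cur else st.1
      let nums' := PySem.List.pySetD st.2.1 idx (cur + v)
      let nw := PySem.List.pyGetD nums' idx 0
      let s2 := if PySem.Int.mod nw 2 = 0 then s1 + nw else s1
      (s2, nums', st.2.2 ++ [s2])) (sums, nums, ([] : List Int))).2.2

-- ===== PORT B =====
-- sum(x for x in nums if x % 2 == 0)
def pvEvenSum (xs : List Int) : Int := (xs.filter (fun x => PySem.Int.mod x 2 == 0)).sum

def sumEvenAfterQueries_alt (nums : List Int) (queries : List (List Int)) : List Int :=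
  (queries.foldl (fun (st : List Int × List Int) q =>
      let v := PySem.List.pyGetD q 0 0
      let idx := PySem.List.pyGetD q 1 0
      let nums' := PySem.List.pySetD st.1 idx (PySem.List.pyGetD st.1 idx 0 + v)
      (nums', st.2 ++ [pvEvenSum nums'])) (nums, ([] : List Int))).2

-- ===== PRECONDITION & SPEC =====
-- Pre_ excludes exactly the inputs on which the Python A raises: a query that is not a
-- 2-element [v, idx] pair (ValueError on unpacking) or whose index is out of range (IndexError).
def Pre_sumEvenAfterQueries (nums : List Int) (queries : List (List Int)) : Prop :=
  ∀ q ∈ queries, q.length = 2 ∧ PySem.Raise.InRange nums.length (PySem.List.pyGetD q 1 0)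
instance (nums : List Int) (queries : List (List Int)) : Decidable (Pre_sumEvenAfterQueries nums queries) := by unfold Pre_sumEvenAfterQueries; infer_instance

def pvWitness_sumEvenAfterQueries : List Int × List (List Int) :=
  ([1, 2, 3, 4], [[1, 0], [-3, 1], [-4, 0], [2, 3]])

def Spec_sumEvenAfterQueries (nums : List Int) (queries : List (List Int)) (out : List Int) : Prop := out = sumEvenAfterQueries_alt nums queries
instance (nums : List Int) (queries : List (List Int)) (out : List Int) : Decidable (Spec_sumEvenAfterQueries nums queries out) := by unfold Spec_sumEvenAfterQueries; infer_instance

-- ===== CLAIM (what is proved, stated in full; the proofs are below) =====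
def Claim_equal_sumEvenAfterQueries : Prop := ∀ (nums : List Int) (queries : List (List Int)), Dom_sumEvenAfterQueries nums queries → Pre_sumEvenAfterQueries nums queries → Spec_sumEvenAfterQueries nums queries (sumEvenAfterQueries nums queries)

-- ===== LEMMAS AND PROOFS =====

-- the contribution of one element to the even-sum
def pvEvenTerm (x : Int) : Int := if PySem.Int.mod x 2 = 0 then x else 0

theorem pvEvenSum_cons (x : Int) (xs : List Int) :
    pvEvenSum (x :: xs) = pvEvenTerm x + pvEvenSum xs := by
  simp only [pvEvenSum, pvEvenTerm, List.filter_cons]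
  by_cases h : PySem.Int.mod x 2 = 0
  · rw [if_pos h, beq_iff_eq.mpr h, if_pos rfl, List.sum_cons]
  · rw [if_neg h, beq_eq_false_iff_ne.mpr h]
    simp only [Bool.false_eq_true, if_false, zero_add]

theorem pvFoldl_evenSum (xs : List Int) (s : Int) :
    xs.foldl (fun s n => if PySem.Int.mod n 2 = 0 then s + n else s) s = s + pvEvenSum xs := by
  induction xs generalizing s with
  | nil => simp [pvEvenSum]
  | cons x xs ih =>
    rw [List.foldl_cons, ih, pvEvenSum_cons]
    unfold pvEvenTerm
    split_ifs <;> ring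

theorem pvIdx_norm (n : Nat) (i : Int) (h : PySem.Raise.InRange n i) :
    ∃ j : Nat, j < n ∧ PySem.List.pyIdx? n i = some j := by
  obtain ⟨h1, h2⟩ := h
  by_cases h0 : 0 ≤ i
  · exact ⟨i.toNat, by omega, by simp [PySem.List.pyIdx?, h0, h2]⟩
  · exact ⟨n - (-i).toNat, by omega, by simp [PySem.List.pyIdx?, h0, h1]⟩

theorem pvGetD_of_idx {xs : List Int} {i : Int} {j : Nat} (hj : j < xs.length)
    (hidx : PySem.List.pyIdx? xs.length i = some j) (d : Int) :
    PySem.List.pyGetD xs i d = xs[j] := by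
  simp [PySem.List.pyGetD, PySem.List.pyGet?, hidx, List.getElem?_eq_getElem hj]

theorem pvSetD_of_idx {xs : List Int} {i : Int} {j : Nat}
    (hidx : PySem.List.pyIdx? xs.length i = some j) (v : Int) :
    PySem.List.pySetD xs i v = xs.set j v := by
  simp [PySem.List.pySetD, PySem.List.pySet?, hidx]

theorem pvEvenSum_set (xs : List Int) (j : Nat) (hj : j < xs.length) (v : Int) :
    pvEvenSum (xs.set j v) = pvEvenSum xs - pvEvenTerm xs[j] + pvEvenTerm v := by
  induction xs generalizing j with
  | nil => simp at hj
  | cons x xs ih =>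
    cases j with
    | zero => simp [pvEvenSum_cons]; ring
    | succ j =>
      simp only [List.set_cons_succ, pvEvenSum_cons, List.getElem_cons_succ]
      rw [ih j (by simpa using hj)]
      ring

theorem pvLoop_eq (queries : List (List Int)) :
    ∀ (nums res : List Int),
      (∀ q ∈ queries, PySem.Raise.InRange nums.length (PySem.List.pyGetD q 1 0)) →
      queries.foldl (fun (st : Int × List Int × List Int) q =>
        let v := PySem.List.pyGetD q 0 0
        let idx := PySem.List.pyGetD q 1 0
        let cur := PySem.List.pyGetD st.2.1 idx 0
        let s1 := if PySem.Int.mod cur 2 = 0 then st.1 - cur else st.1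
        let nums' := PySem.List.pySetD st.2.1 idx (cur + v)
        let nw := PySem.List.pyGetD nums' idx 0
        let s2 := if PySem.Int.mod nw 2 = 0 then s1 + nw else s1
        (s2, nums', st.2.2 ++ [s2])) (pvEvenSum nums, nums, res) =
      (let b := queries.foldl (fun (st : List Int × List Int) q =>
        let v := PySem.List.pyGetD q 0 0
        let idx := PySem.List.pyGetD q 1 0
        let nums' := PySem.List.pySetD st.1 idx (PySem.List.pyGetD st.1 idx 0 + v)
        (nums', st.2 ++ [pvEvenSum nums'])) (nums, res);
       (pvEvenSum b.1, b.1, b.2)) := by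
  induction queries with
  | nil => intro nums res _; simp
  | cons q queries ih =>
    intro nums res hpre
    obtain ⟨j, hj, hidx⟩ := pvIdx_norm nums.length (PySem.List.pyGetD q 1 0)
      (hpre q (List.mem_cons_self))
    simp only [List.foldl_cons]
    have hset := pvSetD_of_idx hidx (nums[j] + PySem.List.pyGetD q 0 0)
    have hget := pvGetD_of_idx hj hidx (0 : Int)
    have hidx' : PySem.List.pyIdx? (nums.set j (nums[j] + PySem.List.pyGetD q 0 0)).length
        (PySem.List.pyGetD q 1 0) = some j := by simpa using hidx
    have hget' := pvGetD_of_idx (xs := nums.set j (nums[j] + PySem.List.pyGetD q 0 0))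
      (by simpa using hj) hidx' (0 : Int)
    have hsum : (if PySem.Int.mod (nums[j] + PySem.List.pyGetD q 0 0) 2 = 0 then
          (if PySem.Int.mod nums[j] 2 = 0 then pvEvenSum nums - nums[j] else pvEvenSum nums)
            + (nums[j] + PySem.List.pyGetD q 0 0)
        else (if PySem.Int.mod nums[j] 2 = 0 then pvEvenSum nums - nums[j] else pvEvenSum nums)) =
        pvEvenSum (nums.set j (nums[j] + PySem.List.pyGetD q 0 0)) := by
      rw [pvEvenSum_set nums j hj]
      unfold pvEvenTerm
      split_ifs <;> ring
    have hlen : ∀ q' ∈ queries,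
        PySem.Raise.InRange (nums.set j (nums[j] + PySem.List.pyGetD q 0 0)).length
          (PySem.List.pyGetD q' 1 0) := by
      intro q' hq'; simpa using hpre q' (List.mem_cons_of_mem _ hq')
    have := ih (nums.set j (nums[j] + PySem.List.pyGetD q 0 0))
      (res ++ [pvEvenSum (nums.set j (nums[j] + PySem.List.pyGetD q 0 0))]) hlen
    simp only [hget, hset, List.getElem_set_self, hget'] at *
    rw [hsum, this]

-- ===== VERDICT (by name: the statement is the Claim_ definition above) =====
theorem sumEvenAfterQueries_spec : Claim_equal_sumEvenAfterQueries := by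
  intro nums queries _ hpre
  have h := pvLoop_eq queries nums [] (fun q hq => (hpre q hq).2)
  simp only [Spec_sumEvenAfterQueries, sumEvenAfterQueries, sumEvenAfterQueries_alt]
  rw [pvFoldl_evenSum nums 0, zero_add, h]
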